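-- pv_equiv track=rewrite | github.com/yann-zhong/GENOM_BIM | src/find_HC.py | put_back_ponctuation
-- ===== SOURCE A (Python) =====
-- def put_back_ponctuation(positions, list_ponctuations):
--     for pos in positions:
--         for ponct in list_ponctuations:
--             if pos >= ponct:
--                 pos+=1
--             else:
--                 break
--         yield pos
-- ===== SOURCE B (Python) =====
-- def put_back_ponctuation(positions, list_ponctuations):
--     # Each position's final value is pos + k, where k is the first index j
--     # with pos < list_ponctuations[j] - j (or len if none): processing the
--     # positions in sorted order, that k is nondecreasing, so one pointer
--     # sweeps the thresholds once for all positions.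
--     thresholds = [p - i for i, p in enumerate(list_ponctuations)]
--     n = len(thresholds)
--     out = [0] * len(positions)
--     j = 0
--     for i, pos in sorted(enumerate(positions), key=lambda t: t[1]):
--         while j < n and pos >= thresholds[j]:
--             j += 1
--         out[i] = pos + j
--     yield from out
-- ===== Notes on version B (the rewrite author's own statement) =====
-- stated objective: faster
-- what changed: B replaces A's per-position rescan of the punctuation list by a one-off threshold transform (ponct[j]-j) and a single monotone pointer sweep over the positions taken in sorted order, writing results back by original index.
import Mathlib
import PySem

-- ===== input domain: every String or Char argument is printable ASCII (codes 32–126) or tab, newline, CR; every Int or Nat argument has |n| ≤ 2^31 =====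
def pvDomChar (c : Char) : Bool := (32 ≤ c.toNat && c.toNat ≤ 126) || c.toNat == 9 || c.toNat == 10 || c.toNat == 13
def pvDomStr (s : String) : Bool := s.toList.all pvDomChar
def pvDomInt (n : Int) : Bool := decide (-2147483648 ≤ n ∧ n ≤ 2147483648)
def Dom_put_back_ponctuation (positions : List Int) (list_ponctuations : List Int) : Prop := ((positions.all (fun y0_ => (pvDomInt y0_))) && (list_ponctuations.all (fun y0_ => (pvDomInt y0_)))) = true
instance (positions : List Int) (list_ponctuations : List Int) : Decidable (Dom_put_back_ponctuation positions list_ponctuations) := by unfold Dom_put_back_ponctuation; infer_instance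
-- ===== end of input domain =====

-- B replaces A's per-position rescan of the punctuation list by a one-off threshold
-- transform and a single monotone pointer sweep over sorted positions (objective: faster).
-- A is a generator; both sides are modelled by the list of yielded values.

-- ===== PORT A =====
-- inner 'for ponct in list_ponctuations' loop with break, mutating pos
def pbpInner (pos : Int) (ponct : List Int) : Int :=
  match ponct with
  | [] => pos
  | p :: ps => if pos ≥ p then pbpInner (pos + 1) ps else pos

def put_back_ponctuation (positions : List Int) (list_ponctuations : List Int) : List Int :=
  positions.map (fun pos => pbpInner pos list_ponctuations)

-- ===== PORT B =====
-- the 'while j < n and pos >= thresholds[j]: j += 1' loop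
def pbpAdv (th : List Int) (pos : Int) (j : Nat) : Nat :=
  if h : j < th.length then
    if pos ≥ th[j] then pbpAdv th pos (j + 1) else j
  else j
termination_by th.length - j

-- body of the 'for i, pos in sorted(...)' loop: state = (j, out)
def pbpStep (th : List Int) (st : Nat × PySem.Dict Int Int) (ip : Int × Int) : Nat × PySem.Dict Int Int :=
  let j := pbpAdv th ip.2 st.1
  (j, st.2.insert ip.1 (ip.2 + (j : Int)))

def put_back_ponctuation_alt (positions : List Int) (list_ponctuations : List Int) : List Int :=
  let thresholds := (PySem.List.enumerate list_ponctuations).map (fun ip => ip.2 - ip.1)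
  let pairs := PySem.List.sorted (PySem.List.enumerate positions) (fun t => t.2) false
  let st := pairs.foldl (pbpStep thresholds) (0, PySem.Dict.empty)
  (List.range positions.length).map (fun i => st.2.getD (Int.ofNat i) 0)

-- ===== PRECONDITION & SPEC =====
def Spec_put_back_ponctuation (positions : List Int) (list_ponctuations : List Int) (out : List Int) : Prop := out = put_back_ponctuation_alt positions list_ponctuations
instance (positions : List Int) (list_ponctuations : List Int) (out : List Int) : Decidable (Spec_put_back_ponctuation positions list_ponctuations out) := by unfold Spec_put_back_ponctuation; infer_instance

-- ===== CLAIM (what is proved, stated in full; the proofs are below) =====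
def Claim_equal_put_back_ponctuation : Prop := ∀ (positions : List Int) (list_ponctuations : List Int), Dom_put_back_ponctuation positions list_ponctuations → Spec_put_back_ponctuation positions list_ponctuations (put_back_ponctuation positions list_ponctuations)

-- ===== LEMMAS AND PROOFS =====

-- number of thresholds an initial position slides past: length of the passing prefix
def pbpCnt (pos : Int) (th : List Int) : Nat :=
  (th.takeWhile (fun t => decide (pos ≥ t))).length

def pbpThr (l : List Int) : List Int :=
  (PySem.List.enumerate l).map (fun ip => ip.2 - ip.1)

lemma pbpThr_enum_shift (xs : List Int) (s : Int) :
    (PySem.List.enumerate xs (s + 1)).map (fun ip => ip.2 - ip.1) =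
      ((PySem.List.enumerate xs s).map (fun ip => ip.2 - ip.1)).map (fun t => t - 1) := by
  induction xs generalizing s with
  | nil => simp [PySem.List.enumerate_nil]
  | cons x xs ih =>
      simp only [PySem.List.enumerate_cons, List.map_cons, List.map_map, List.cons.injEq]
      refine ⟨by ring, ?_⟩
      have := ih (s + 1)
      simpa using this

lemma pbpThr_cons (p : Int) (ps : List Int) :
    pbpThr (p :: ps) = p :: (pbpThr ps).map (fun t => t - 1) := by
  simp only [pbpThr, PySem.List.enumerate_cons, List.map_cons, List.cons.injEq]
  refine ⟨by ring, ?_⟩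
  simpa using pbpThr_enum_shift ps 0

lemma pbpCnt_map_sub (pos : Int) (th : List Int) :
    pbpCnt pos (th.map (fun t => t - 1)) = pbpCnt (pos + 1) th := by
  induction th with
  | nil => rfl
  | cons t ts ih =>
      simp only [pbpCnt, List.map_cons, List.takeWhile]
      have : (decide (pos ≥ t - 1)) = (decide (pos + 1 ≥ t)) := by
        simp only [decide_eq_decide]; omega
      rw [this]
      by_cases h : pos + 1 ≥ t
      · simp only [h, decide_true, List.length_cons]
        have := ih
        simp only [pbpCnt] at this
        omega
      · simp [h]

lemma pbpInner_eq (ponct : List Int) : ∀ pos, pbpInner pos ponct = pos + pbpCnt pos (pbpThr ponct) := by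
  induction ponct with
  | nil => intro pos; simp [pbpInner, pbpThr, pbpCnt, PySem.List.enumerate_nil]
  | cons p ps ih =>
      intro pos
      rw [pbpThr_cons]
      by_cases h : pos ≥ p
      · simp only [pbpInner, h, if_pos]
        rw [ih (pos + 1)]
        simp only [pbpCnt, List.takeWhile, h, decide_true, List.length_cons]
        have := pbpCnt_map_sub pos (pbpThr ps)
        simp only [pbpCnt] at this
        omega
      · simp [pbpInner, h, pbpCnt, List.takeWhile]

lemma pbpAdv_eq (th : List Int) (pos : Int) (j : Nat) :
    pbpAdv th pos j = j + pbpCnt pos (th.drop j) := by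
  have H : ∀ n j, th.length - j ≤ n → pbpAdv th pos j = j + pbpCnt pos (th.drop j) := by
    intro n
    induction n with
    | zero =>
        intro j hj
        rw [pbpAdv, dif_neg (by omega), List.drop_eq_nil_of_le (by omega)]
        simp [pbpCnt]
    | succ n ih =>
        intro j hj
        by_cases h : j < th.length
        · rw [pbpAdv, dif_pos h]
          by_cases hge : pos ≥ th[j]
          · rw [if_pos hge, ih (j + 1) (by omega), List.drop_eq_getElem_cons h]
            simp only [pbpCnt, List.takeWhile, hge, decide_true, List.length_cons]
            omega
          · rw [if_neg hge, List.drop_eq_getElem_cons h]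
            simp [pbpCnt, List.takeWhile, hge]
        · rw [pbpAdv, dif_neg h, List.drop_eq_nil_of_le (by omega)]
          simp [pbpCnt]
  exact H th.length j (by omega)

-- a pointer already past a fully-passing prefix finds the global count
lemma pbpCnt_split (pos : Int) : ∀ (j : Nat) (th : List Int), j ≤ th.length →
    (∀ t ∈ th.take j, pos ≥ t) → pbpCnt pos th = j + pbpCnt pos (th.drop j) := by
  intro j
  induction j with
  | zero => intro th _ _; simp
  | succ j ih =>
      intro th hlen hpre
      match th with
      | [] => simp at hlen
      | t :: ts =>
          have ht : pos ≥ t := hpre t (by simp)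
          simp only [pbpCnt, List.takeWhile, ht, decide_true, List.length_cons, List.drop_succ_cons]
          have := ih ts (by simpa using hlen) (by intro u hu; exact hpre u (by simp [hu]))
          simp only [pbpCnt] at this
          omega

lemma pbpAdv_full (th : List Int) (pos : Int) (j : Nat) (hlen : j ≤ th.length)
    (hpre : ∀ t ∈ th.take j, pos ≥ t) : pbpAdv th pos j = pbpCnt pos th := by
  rw [pbpAdv_eq, pbpCnt_split pos j th hlen hpre]

lemma pbpCnt_le (pos : Int) (th : List Int) : pbpCnt pos th ≤ th.length := by
  simpa [pbpCnt] using
    List.IsPrefix.length_le (List.takeWhile_prefix (l := th) (p := fun t => decide (pos ≥ t)))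

lemma pbpCnt_take_ge (pos : Int) (th : List Int) :
    ∀ t ∈ th.take (pbpCnt pos th), pos ≥ t := by
  intro t ht
  have hpref : th.takeWhile (fun u => decide (pos ≥ u)) = th.take (pbpCnt pos th) := by
    have h := List.takeWhile_prefix (l := th) (p := fun u => decide (pos ≥ u))
    exact List.prefix_iff_eq_take.mp h
  rw [← hpref] at ht
  simpa using List.mem_takeWhile_imp ht

-- first-match lookup in a list of pairs with nodup keys
lemma find?_of_mem_nodup : ∀ (l : List (Int × Int)) (k v : Int),
    (k, v) ∈ l → (l.map Prod.fst).Nodup → l.find? (fun ip => ip.1 == k) = some (k, v) := by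
  intro l
  induction l with
  | nil => intro k v h _; simp at h
  | cons p rest ih =>
      intro k v hmem hnodup
      rcases List.mem_cons.mp hmem with h | h
      · rw [← h]
        exact List.find?_cons_of_pos (by simp)
      · have hk : p.1 ≠ k := by
          intro he
          have hm : k ∈ rest.map Prod.fst := List.mem_map.mpr ⟨(k, v), h, rfl⟩
          simp only [List.map_cons, List.nodup_cons] at hnodup
          exact hnodup.1 (he ▸ hm)
        rw [List.find?_cons_of_neg (by simpa using hk)]
        exact ih k v h (by simp only [List.map_cons, List.nodup_cons] at hnodup; exact hnodup.2)

-- the main loop invariant: after the sweep, each index holds pos + pbpCnt pos th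
lemma pbpFold_get (th : List Int) :
    ∀ (pairs : List (Int × Int)) (j : Nat) (d : PySem.Dict Int Int),
      j ≤ th.length →
      (∀ t ∈ th.take j, ∀ ip ∈ pairs, ip.2 ≥ t) →
      pairs.Pairwise (fun a b => a.2 ≤ b.2) →
      (pairs.map Prod.fst).Nodup →
      ∀ x : Int,
        (pairs.foldl (pbpStep th) (j, d)).2.get? x =
          (match pairs.find? (fun ip => ip.1 == x) with
           | some ip => some (ip.2 + (pbpCnt ip.2 th : Int))
           | none => d.get? x) := by
  intro pairs
  induction pairs with
  | nil => intro j d _ _ _ _ x; simp [List.find?]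
  | cons ip rest ih =>
      intro j d hlen hpre hpw hnodup x
      have hadv : pbpAdv th ip.2 j = pbpCnt ip.2 th :=
        pbpAdv_full th ip.2 j hlen (fun t ht => hpre t ht ip (by simp))
      have hpw' : rest.Pairwise (fun a b => a.2 ≤ b.2) := (List.pairwise_cons.mp hpw).2
      have hle : ∀ q ∈ rest, ip.2 ≤ q.2 := (List.pairwise_cons.mp hpw).1
      have hnodup' : (rest.map Prod.fst).Nodup := by
        simp only [List.map_cons, List.nodup_cons] at hnodup; exact hnodup.2
      have hnotin : ip.1 ∉ rest.map Prod.fst := by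
        simp only [List.map_cons, List.nodup_cons] at hnodup; exact hnodup.1
      simp only [List.foldl_cons]
      have hstep : pbpStep th (j, d) ip =
          (pbpCnt ip.2 th, d.insert ip.1 (ip.2 + (pbpCnt ip.2 th : Int))) := by
        simp [pbpStep, hadv]
      rw [hstep]
      have hih := ih (pbpCnt ip.2 th) (d.insert ip.1 (ip.2 + (pbpCnt ip.2 th : Int)))
        (pbpCnt_le ip.2 th)
        (by
          intro t ht q hq
          have h1 : ip.2 ≥ t := pbpCnt_take_ge ip.2 th t ht
          have h2 := hle q hq
          omega)
        hpw' hnodup' x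
      rw [hih]
      by_cases hx : ip.1 = x
      · subst hx
        have hrest : rest.find? (fun q => q.1 == ip.1) = none := by
          rw [List.find?_eq_none]
          intro q hq
          simp only [beq_iff_eq]
          intro he
          exact hnotin (List.mem_map.mpr ⟨q, hq, he⟩)
        rw [hrest, List.find?_cons_of_pos (by simp)]
        simp [PySem.Dict.get?_insert_self]
      · rw [List.find?_cons_of_neg (by simpa using hx)]
        cases hfind : rest.find? (fun q => q.1 == x) with
        | some q => simp
        | none => exact PySem.Dict.get?_insert_of_ne d _ (fun he => hx (Eq.symm he))

-- ===== VERDICT (by name: the statement is the Claim_ definition above) =====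
theorem put_back_ponctuation_spec : Claim_equal_put_back_ponctuation := by
  intro positions list_ponctuations _hdom
  unfold Spec_put_back_ponctuation put_back_ponctuation put_back_ponctuation_alt
  set th := (PySem.List.enumerate list_ponctuations).map (fun ip => ip.2 - ip.1) with hth
  set pairs := PySem.List.sorted (PySem.List.enumerate positions) (fun t => t.2) false with hpairs
  have hperm : pairs.Perm (PySem.List.enumerate positions) :=
    PySem.List.sorted_perm (PySem.List.enumerate positions) (fun t => t.2) false
  have hpw : pairs.Pairwise (fun a b => a.2 ≤ b.2) := PySem.List.sorted_pairwise _ _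
  have hnodupE : ((PySem.List.enumerate positions (start := 0)).map Prod.fst).Nodup := by
    have h := PySem.List.pairwise_lt_enumerate (xs := positions) (s := 0)
    exact List.pairwise_map.mpr (h.imp (fun hlt => Int.ne_of_lt hlt))
  have hnodup : (pairs.map Prod.fst).Nodup := ((hperm.map Prod.fst).nodup_iff).mpr hnodupE
  have hget := pbpFold_get th pairs 0 PySem.Dict.empty (by simp) (by simp) hpw hnodup
  apply List.ext_getElem
  · simp
  · intro i h1 h2
    have hip : i < positions.length := by simpa using h1
    simp only [List.getElem_map, List.getElem_range]
    have hmem : ((i : Int), positions[i]) ∈ pairs := by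
      rw [hperm.mem_iff, PySem.List.mem_enumerate_iff]
      exact ⟨i, hip, by simp⟩
    have hfind : pairs.find? (fun ip => ip.1 == (i : Int)) = some ((i : Int), positions[i]) :=
      find?_of_mem_nodup pairs (i : Int) positions[i] hmem hnodup
    rw [pbpInner_eq]
    rw [PySem.Dict.getD_eq_get?_getD, hget (Int.ofNat i)]
    have : Int.ofNat i = (i : Int) := rfl
    rw [this, hfind]
    simp [pbpThr, hth]
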